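-- pv_equiv track=rewrite | github.com/Trust-App-AI-Lab/PokerBot | poker-agent/tools/range_parser.py | _pair_combos
-- ===== SOURCE A (Python) =====
-- from itertools import combinations
--
-- SUITS = "shdc"
--
-- def _pair_combos(rank_ch: str, dead: set = None) -> list[tuple[str, str]]:
--     """All 6 combos for a pocket pair, minus dead cards."""
--     r = rank_ch
--     combos = []
--     for s1, s2 in combinations(range(4), 2):
--         c1 = f"{r}{SUITS[s1]}"
--         c2 = f"{r}{SUITS[s2]}"
--         if dead and (c1 in dead or c2 in dead):
--             continue
--         combos.append((c1, c2))
--     return combos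
-- ===== SOURCE B (Python) =====
-- SUITS = "shdc"
--
-- def _pair_combos(rank_ch: str, dead: set = None) -> list[tuple[str, str]]:
--     """All 6 combos for a pocket pair, minus dead cards."""
--     res = []
--     later = []  # live cards strictly to the right of the current suit
--     for s in reversed(SUITS):
--         c = f"{rank_ch}{s}"
--         if dead and c in dead:
--             continue
--         res = [(c, x) for x in later] + res
--         later = [c] + later
--     return res
-- ===== Notes on version B (the rewrite author's own statement) =====
-- stated objective: alternative
-- what changed: B makes a single right-to-left pass over the suits, maintaining the list of live later cards as an accumulator and building the output back-to-front, instead of A's enumeration of all index pairs with a skip test on each.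
import Mathlib
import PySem

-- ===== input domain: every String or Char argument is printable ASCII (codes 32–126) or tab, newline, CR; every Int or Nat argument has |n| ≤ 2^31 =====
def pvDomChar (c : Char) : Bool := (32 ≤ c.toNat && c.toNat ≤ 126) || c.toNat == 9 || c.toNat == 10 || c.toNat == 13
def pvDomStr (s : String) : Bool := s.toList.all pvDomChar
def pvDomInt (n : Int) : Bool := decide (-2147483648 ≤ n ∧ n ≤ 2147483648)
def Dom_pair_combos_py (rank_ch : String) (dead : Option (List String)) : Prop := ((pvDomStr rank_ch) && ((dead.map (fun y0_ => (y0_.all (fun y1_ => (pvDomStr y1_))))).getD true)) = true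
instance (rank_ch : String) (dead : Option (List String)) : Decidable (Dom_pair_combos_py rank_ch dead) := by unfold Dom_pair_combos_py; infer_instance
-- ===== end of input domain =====

-- B replaces A's enumeration of all 6 index pairs (with a skip test per pair) by a single
-- right-to-left pass over the suits that keeps the live later cards in an accumulator and
-- builds the output back-to-front; objective: alternative. Return values are identical.

-- itertools.combinations(range(4), 2), in itertools order (used only by A)
def comb2 {α : Type} : List α → List (α × α)
  | [] => []
  | x :: xs => (xs.map fun y => (x, y)) ++ comb2 xs

-- Python truthiness of the 'dead' set (None and the empty set are falsy)
def deadTruthy (dead : Option (List String)) : Bool :=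
  match dead with
  | none => false
  | some l => !l.isEmpty

-- ===== PORT A =====
def pair_combos_py (rank_ch : String) (dead : Option (List String)) : List (String × String) :=
  (comb2 (PySem.List.pyRange 0 4 1)).foldl
    (fun combos p =>
      let c1 := rank_ch ++ String.ofList [(PySem.Str.pyGet? "shdc" p.1).getD ' ']   -- index always in range
      let c2 := rank_ch ++ String.ofList [(PySem.Str.pyGet? "shdc" p.2).getD ' ']
      if deadTruthy dead = true ∧ (c1 ∈ dead.getD [] ∨ c2 ∈ dead.getD []) then combos
      else combos ++ [(c1, c2)])
    []

-- ===== PORT B =====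
-- reversed(SUITS) loop with accumulators (res, later) = foldr over the suit list
def pair_combos_py_alt (rank_ch : String) (dead : Option (List String)) : List (String × String) :=
  (("shdc".toList).foldr
    (fun s (acc : List (String × String) × List String) =>
      let c := rank_ch ++ String.ofList [s]
      if deadTruthy dead = true ∧ c ∈ dead.getD [] then acc
      else (acc.2.map (fun x => (c, x)) ++ acc.1, c :: acc.2))
    ([], [])).1

-- ===== PRECONDITION & SPEC =====
def Spec_pair_combos_py (rank_ch : String) (dead : Option (List String)) (out : List (String × String)) : Prop := out = pair_combos_py_alt rank_ch dead
instance (rank_ch : String) (dead : Option (List String)) (out : List (String × String)) : Decidable (Spec_pair_combos_py rank_ch dead out) := by unfold Spec_pair_combos_py; infer_instance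

-- ===== CLAIM (what is proved, stated in full; the proofs are below) =====
def Claim_equal_pair_combos_py : Prop := ∀ (rank_ch : String) (dead : Option (List String)), Dom_pair_combos_py rank_ch dead → Spec_pair_combos_py rank_ch dead (pair_combos_py rank_ch dead)

-- ===== LEMMAS AND PROOFS =====

theorem pyRange04 : PySem.List.pyRange 0 4 1 = [0, 1, 2, 3] := by decide

theorem shdcToList : "shdc".toList = ['s', 'h', 'd', 'c'] := by decide

-- ===== VERDICT (by name: the statement is the Claim_ definition above) =====
theorem pair_combos_py_spec : Claim_equal_pair_combos_py := by
  intro rank_ch dead _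
  unfold Spec_pair_combos_py pair_combos_py pair_combos_py_alt
  rw [pyRange04, shdcToList]
  by_cases hT : deadTruthy dead = true <;>
  by_cases h1 : rank_ch ++ String.ofList ['s'] ∈ dead.getD [] <;>
  by_cases h2 : rank_ch ++ String.ofList ['h'] ∈ dead.getD [] <;>
  by_cases h3 : rank_ch ++ String.ofList ['d'] ∈ dead.getD [] <;>
  by_cases h4 : rank_ch ++ String.ofList ['c'] ∈ dead.getD [] <;>
  simp [comb2, hT, h1, h2, h3, h4, PySem.Str.pyGet?, List.foldr]
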